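-- pv_equiv track=rewrite | github.com/opooladz/levanter | src/levanter/optim/quad_uh.py | _sort_and_group_matrices
-- ===== SOURCE A (Python) =====
-- from collections import defaultdict
-- from typing import Any, Callable, Generic, List, Optional, Tuple, TypeVar, Union, cast
--
-- def _sort_and_group_matrices(matrix_shapes: List[Tuple[int, ...]]):
--     indexed_list = list(enumerate(matrix_shapes))
--     sorted_indexed = sorted(indexed_list, key=lambda x: x[1])
--     sorted_shapes = [shape for _, shape in sorted_indexed]
--     change_indices = [original_index for original_index, _ in sorted_indexed]
--     revert_indices = [0] * len(matrix_shapes)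
--     for new_pos, (original_index, _) in enumerate(sorted_indexed):
--         revert_indices[original_index] = new_pos
--     shape_groups = defaultdict(list)
--     for i, shape in enumerate(sorted_shapes):
--         shape_groups[shape].append(i)
--     unique_sorted_shapes = list(shape_groups.keys())
--     return unique_sorted_shapes, dict(shape_groups), change_indices, revert_indices
-- ===== SOURCE B (Python) =====
-- def _sort_and_group_matrices(matrix_shapes):
--     # group original indices by shape in one pass (first-occurrence order)
--     groups = {}
--     for i, shape in enumerate(matrix_shapes):
--         groups.setdefault(shape, []).append(i)
--     # sort only the distinct shapes
--     unique_sorted_shapes = sorted(groups.keys())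
--     change_indices = []
--     shape_groups = {}
--     revert_indices = [0] * len(matrix_shapes)
--     pos = 0
--     for shape in unique_sorted_shapes:
--         orig = groups[shape]
--         shape_groups[shape] = list(range(pos, pos + len(orig)))
--         for original_index in orig:
--             change_indices.append(original_index)
--             revert_indices[original_index] = pos
--             pos += 1
--     return unique_sorted_shapes, shape_groups, change_indices, revert_indices
-- ===== Notes on version B (the rewrite author's own statement) =====
-- stated objective: alternative
-- what changed: B builds a shape-to-original-indices dict in one pass and sorts only the distinct shapes, then emits change_indices, revert_indices and contiguous position ranges per group in a single concatenation loop, instead of A's stable sort of the whole indexed list followed by a second dict-grouping pass over the sorted shapes.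
import Mathlib
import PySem

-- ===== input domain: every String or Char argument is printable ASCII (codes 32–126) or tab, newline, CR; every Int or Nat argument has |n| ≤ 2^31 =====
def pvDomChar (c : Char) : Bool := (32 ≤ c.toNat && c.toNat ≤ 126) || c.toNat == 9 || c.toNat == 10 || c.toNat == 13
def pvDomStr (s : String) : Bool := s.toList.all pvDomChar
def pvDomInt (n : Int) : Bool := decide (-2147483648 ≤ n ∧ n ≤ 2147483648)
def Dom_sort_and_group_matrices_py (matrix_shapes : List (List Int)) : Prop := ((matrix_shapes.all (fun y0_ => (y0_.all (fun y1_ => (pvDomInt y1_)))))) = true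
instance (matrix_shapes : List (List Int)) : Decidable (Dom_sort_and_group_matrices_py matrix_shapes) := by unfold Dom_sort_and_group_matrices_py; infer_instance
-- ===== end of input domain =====

-- B groups original indices by shape in one dict pass and sorts only the DISTINCT
-- shapes, instead of A's sort of the whole indexed list followed by a second
-- grouping pass; objective: alternative decomposition (return value proved equal).
-- ===== PORT A =====
def sort_and_group_matrices_py (matrix_shapes : List (List Int)) :
    List (List Int) × (List (List Int × List Int)) × List Int × List Int :=
  let indexed_list := PySem.List.enumerate matrix_shapes
  let sorted_indexed := PySem.List.sorted indexed_list (fun x => x.2) false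
  let sorted_shapes := sorted_indexed.map (fun p => p.2)
  let change_indices := sorted_indexed.map (fun p => p.1)
  let revert_indices := (PySem.List.enumerate sorted_indexed).foldl
    (fun acc q => PySem.List.pySetD acc q.2.1 q.1)
    (PySem.List.pyRepeat [(0 : Int)] (matrix_shapes.length : Int))
  let shape_groups := (PySem.List.enumerate sorted_shapes).foldl
    (fun d p => d.modify p.2 [] (fun l => l ++ [p.1])) (PySem.Dict.empty)
  let unique_sorted_shapes := shape_groups.keys
  (unique_sorted_shapes, shape_groups.items, change_indices, revert_indices)

-- ===== PORT B =====
def sort_and_group_matrices_py_alt (matrix_shapes : List (List Int)) :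
    List (List Int) × (List (List Int × List Int)) × List Int × List Int :=
  let groups := (PySem.List.enumerate matrix_shapes).foldl
    (fun d p => d.modify p.2 [] (fun l => l ++ [p.1])) (PySem.Dict.empty)
  let unique_sorted_shapes := PySem.List.sorted groups.keys (fun k => k) false
  let st := unique_sorted_shapes.foldl
    (fun st shape =>
      let orig := groups.getD shape []
      let sg := st.1.insert shape (PySem.List.pyRange st.2.2.2 (st.2.2.2 + (orig.length : Int)) 1)
      let inner := orig.foldl
        (fun st2 original_index =>
          (st2.1 ++ [original_index], PySem.List.pySetD st2.2.1 original_index st2.2.2, st2.2.2 + 1))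
        (st.2.1, st.2.2.1, st.2.2.2)
      (sg, inner.1, inner.2.1, inner.2.2))
    ((PySem.Dict.empty : PySem.Dict (List Int) (List Int)), ([] : List Int),
      PySem.List.pyRepeat [(0 : Int)] (matrix_shapes.length : Int), (0 : Int))
  (unique_sorted_shapes, st.1.items, st.2.1, st.2.2.1)

-- ===== PRECONDITION & SPEC =====
def Spec_sort_and_group_matrices_py (matrix_shapes : List (List Int)) (out : List (List Int) × (List (List Int × List Int)) × List Int × List Int) : Prop := out = sort_and_group_matrices_py_alt matrix_shapes
instance (matrix_shapes : List (List Int)) (out : List (List Int) × (List (List Int × List Int)) × List Int × List Int) : Decidable (Spec_sort_and_group_matrices_py matrix_shapes out) := by unfold Spec_sort_and_group_matrices_py; infer_instance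

-- ===== CLAIM =====
def Claim_equal_sort_and_group_matrices_py : Prop := ∀ (matrix_shapes : List (List Int)), Dom_sort_and_group_matrices_py matrix_shapes → Spec_sort_and_group_matrices_py matrix_shapes (sort_and_group_matrices_py matrix_shapes)

-- ===== LEMMAS AND PROOFS =====

def pvGrp (l : List (Int × List Int)) (k : List Int) : List (Int × List Int) :=
  l.filter (fun q => q.2 == k)

/-- comparison of shapes under the `LinearOrder (List Int)` instance, as a Bool -/
def pvLt (a b : List Int) : Prop := @LT.lt _ List.instLinearOrder.toLT a b

def pvBefK (a b : List Int) : Bool :=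
  @decide (pvLt a b) (@LinearOrder.toDecidableLT _ List.instLinearOrder a b)

/-- `sorted` pinned to the `LinearOrder (List Int)` instance (the ports elaborate with
core's `List.instLT`; `pv_sorted_inst` bridges the two) -/
def pvSortedL {α : Type} (xs : List α) (key : α → List Int) : List α :=
  @PySem.List.sorted α (List Int) List.instLinearOrder.toLT
    (@LinearOrder.toDecidableLT _ List.instLinearOrder) xs key false

def pvKS (l : List (Int × List Int)) : List (List Int) :=
  pvSortedL (PySem.Set.ofList (l.map (fun p => p.2))) (fun k => k)

theorem pv_lt_eq : (List.instLT : LT (List Int)) = List.instLinearOrder.toLT := by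
  have h : (@LT.lt _ (List.instLT : LT (List Int))) = @LT.lt _ List.instLinearOrder.toLT := by
    funext a b
    exact propext ⟨fun h => (List.lt_iff_lex_lt a b).mp h,
      fun h => (List.lt_iff_lex_lt a b).mpr h⟩
  calc (List.instLT : LT (List Int)) = ⟨@LT.lt _ (List.instLT : LT (List Int))⟩ := rfl
    _ = ⟨@LT.lt _ List.instLinearOrder.toLT⟩ := by rw [h]
    _ = List.instLinearOrder.toLT := rfl

theorem pv_sorted_inst_congr {α κ : Type} (i1 i2 : LT κ) (h : i1 = i2)
    (d1 : @DecidableLT κ i1) (d2 : @DecidableLT κ i2) (xs : List α) (key : α → κ) :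
    @PySem.List.sorted α κ i1 d1 xs key false = @PySem.List.sorted α κ i2 d2 xs key false := by
  subst h
  have hd : d1 = d2 := by funext a b; exact Subsingleton.elim _ _
  rw [hd]

/-- the ports' `sorted` calls equal the pinned-instance `sorted` -/
theorem pv_sorted_inst {α : Type} (xs : List α) (key : α → List Int) :
    PySem.List.sorted xs key false = pvSortedL xs key :=
  pv_sorted_inst_congr _ _ pv_lt_eq _ _ xs key

theorem pv_sortedL_foldl {α : Type} (xs : List α) (key : α → List Int) :
    pvSortedL xs key
      = xs.foldl (fun acc x => PySem.List.insertBy (fun a b => pvBefK (key a) (key b)) x acc) [] := by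
  unfold pvSortedL pvBefK pvLt
  exact @PySem.List.sorted_eq_foldl_insertBy α (List Int) List.instLinearOrder.toLT
    (@LinearOrder.toDecidableLT _ List.instLinearOrder) xs key

theorem pv_insertBy_cons {α : Type} (before : α → α → Bool) (x y : α) (ys : List α) :
    PySem.List.insertBy before x (y :: ys)
      = if before x y then x :: y :: ys else y :: PySem.List.insertBy before x ys := rfl

theorem pv_insertBy_append {α : Type} (before : α → α → Bool) (x : α) (A B : List α)
    (h : ∀ y ∈ A, before x y = false) :
    PySem.List.insertBy before x (A ++ B) = A ++ PySem.List.insertBy before x B := by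
  induction A with
  | nil => simp
  | cons y ys ih =>
    have hy := h y (by simp)
    simp only [List.cons_append, pv_insertBy_cons, hy, if_neg Bool.false_ne_true]
    rw [ih (fun z hz => h z (by simp [hz]))]

theorem pv_insertBy_split {α : Type} (before : α → α → Bool) (x : α) (A B : List α)
    (hA : ∀ y ∈ A, before x y = false)
    (hB : ∀ h t, B = h :: t → before x h = true) :
    PySem.List.insertBy before x (A ++ B) = A ++ x :: B := by
  rw [pv_insertBy_append before x A B hA]
  cases B with
  | nil => rfl
  | cons h t => rw [pv_insertBy_cons, if_pos (hB h t rfl)]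

theorem pv_befK_true {a b : List Int} (h : pvLt a b) : pvBefK a b = true := by
  unfold pvBefK
  exact @decide_eq_true (pvLt a b) (@LinearOrder.toDecidableLT _ List.instLinearOrder a b) h

theorem pv_befK_false {a b : List Int} (h : ¬ pvLt a b) : pvBefK a b = false := by
  unfold pvBefK
  exact @decide_eq_false (pvLt a b) (@LinearOrder.toDecidableLT _ List.instLinearOrder a b) h

theorem pv_insertBy_sorted_split (ks : List (List Int)) (x : List Int)
    (hp : ks.Pairwise pvLt) (hx : x ∉ ks) :
    ∃ k1 k2, ks = k1 ++ k2 ∧ (∀ k ∈ k1, pvLt k x) ∧ (∀ k ∈ k2, pvLt x k) ∧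
      PySem.List.insertBy (fun a b => pvBefK a b) x ks = k1 ++ x :: k2 := by
  induction ks with
  | nil => exact ⟨[], [], rfl, by simp, by simp, rfl⟩
  | cons k ks ih =>
    rcases List.pairwise_cons.mp hp with ⟨hk, hp'⟩
    by_cases hlt : pvLt x k
    · refine ⟨[], k :: ks, rfl, by simp, ?_, ?_⟩
      · intro k' hk'
        rcases List.mem_cons.mp hk' with rfl | hmem
        · exact hlt
        · exact lt_trans hlt (hk _ hmem)
      · rw [pv_insertBy_cons, if_pos (pv_befK_true hlt)]; rfl
    · have hne : k ≠ x := fun h => hx (h ▸ List.mem_cons_self ..)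
      have hkx : pvLt k x := lt_of_le_of_ne (not_lt.mp hlt) hne
      rcases ih hp' (fun h => hx (List.mem_cons_of_mem _ h)) with ⟨k1, k2, he, h1, h2, hres⟩
      refine ⟨k :: k1, k2, by rw [he]; rfl, ?_, h2, ?_⟩
      · intro k' hk'
        rcases List.mem_cons.mp hk' with rfl | hmem
        · exact hkx
        · exact h1 _ hmem
      · rw [pv_insertBy_cons, if_neg (by rw [pv_befK_false hlt]; exact Bool.false_ne_true), hres]
        rfl

theorem pv_grp_append (t : List (Int × List Int)) (p : Int × List Int) (k : List Int) :
    pvGrp (t ++ [p]) k = pvGrp t k ++ (if p.2 == k then [p] else []) := by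
  rcases h : (p.2 == k) <;>
    simp [pvGrp, List.filter_append, h]

theorem pv_snd_of_mem_grp {l : List (Int × List Int)} {k : List Int} {q : Int × List Int}
    (h : q ∈ pvGrp l k) : q.2 = k := by
  have := List.of_mem_filter h
  simpa using this

theorem pv_grp_eq_nil {l : List (Int × List Int)} {k : List Int}
    (h : k ∉ l.map (fun p => p.2)) : pvGrp l k = [] := by
  refine List.filter_eq_nil_iff.mpr ?_
  intro q hq hbeq
  exact h (List.mem_map.mpr ⟨q, hq, by simpa using hbeq⟩)

theorem pv_mem_pvKS {l : List (Int × List Int)} {x : List Int} :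
    x ∈ pvKS l ↔ x ∈ l.map (fun p => p.2) := by
  refine Iff.trans ?_ (PySem.Set.mem_ofList _ _)
  exact @PySem.List.mem_sorted _ _ List.instLinearOrder.toLT
    (@LinearOrder.toDecidableLT _ List.instLinearOrder)
    (PySem.Set.ofList (l.map (fun p => p.2))) (fun k => k) false x

theorem pv_uniqB (l : List (Int × List Int)) :
    PySem.List.sorted (PySem.Set.ofList (l.map (fun p => p.2))) (fun k => k) false = pvKS l :=
  pv_sorted_inst _ _

-- THE HEART: Python's stable sort of the enumerated list is the concatenation of
-- the per-shape groups, one block per distinct shape in sorted order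
theorem pv_sorted_groupedL (l : List (Int × List Int)) :
    pvSortedL l (fun p => p.2) = (pvKS l).flatMap (pvGrp l) := by
  induction l using List.reverseRecOn with
  | nil => rfl
  | append_singleton t p ih =>
    have hL : pvSortedL (t ++ [p]) (fun q => q.2)
        = PySem.List.insertBy (fun a b => pvBefK a.2 b.2) p (pvSortedL t (fun q => q.2)) := by
      rw [pv_sortedL_foldl, pv_sortedL_foldl, List.foldl_append, List.foldl_cons, List.foldl_nil]
    have hofl : PySem.Set.ofList ((t ++ [p]).map (fun q => q.2))
        = PySem.Set.add (PySem.Set.ofList (t.map (fun q => q.2))) p.2 := by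
      rw [List.map_append, PySem.Set.ofList, List.foldl_append]
      rfl
    have hpw : (pvKS t).Pairwise pvLt :=
      PySem.List.sorted_ofList_pairwise_lt (t.map (fun q => q.2))
    rcases hc : PySem.Set.contains (PySem.Set.ofList (t.map (fun q => q.2))) p.2 with _ | _
    · -- p.2 is a NEW shape
      have hnotmem : p.2 ∉ t.map (fun q => q.2) := by
        simpa [PySem.Set.contains] using hc
      have hxks : p.2 ∉ pvKS t := fun hmem => hnotmem (pv_mem_pvKS.mp hmem)
      rcases pv_insertBy_sorted_split (pvKS t) p.2 hpw hxks with ⟨k1, k2, he, h1, h2, hres⟩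
      have hKSnew : pvKS (t ++ [p]) = k1 ++ p.2 :: k2 := by
        rw [pvKS, hofl, PySem.Set.add, hc]
        simp only [Bool.false_eq_true, if_false]
        rw [pv_sortedL_foldl, List.foldl_append, List.foldl_cons, List.foldl_nil,
          ← pv_sortedL_foldl]
        rw [← pvKS, ← hres]
      rw [hL, ih, he, hKSnew]
      rw [List.flatMap_append, List.flatMap_append, List.flatMap_cons]
      have hg1 : ∀ k ∈ k1, pvGrp (t ++ [p]) k = pvGrp t k := by
        intro k hk
        rw [pv_grp_append]
        have hb : (p.2 == k) = false := by
          simp only [beq_eq_false_iff_ne, ne_eq]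
          exact fun he2 => absurd (he2 ▸ h1 k hk) (lt_irrefl _)
        rw [hb]; simp
      have hg2 : ∀ k ∈ k2, pvGrp (t ++ [p]) k = pvGrp t k := by
        intro k hk
        rw [pv_grp_append]
        have hb : (p.2 == k) = false := by
          simp only [beq_eq_false_iff_ne, ne_eq]
          exact fun he2 => absurd (he2 ▸ h2 k hk) (lt_irrefl _)
        rw [hb]; simp
      have hgx : pvGrp (t ++ [p]) p.2 = [p] := by
        rw [pv_grp_append, pv_grp_eq_nil hnotmem]
        simp
      rw [List.flatMap_congr hg1, List.flatMap_congr hg2, hgx]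
      rw [pv_insertBy_split _ p (k1.flatMap (pvGrp t)) (k2.flatMap (pvGrp t)) ?_ ?_]
      · simp
      · intro y hy
        rcases List.mem_flatMap.mp hy with ⟨k, hk, hyk⟩
        have h2y : y.2 = k := pv_snd_of_mem_grp hyk
        refine pv_befK_false ?_
        rw [h2y]
        exact not_lt.mpr (le_of_lt (h1 k hk))
      · intro h tl hbt
        have hh : h ∈ k2.flatMap (pvGrp t) := by rw [hbt]; simp
        rcases List.mem_flatMap.mp hh with ⟨k, hk, hyk⟩
        have h2y : h.2 = k := pv_snd_of_mem_grp hyk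
        refine pv_befK_true ?_
        rw [h2y]
        exact h2 k hk
    · -- p.2 is an EXISTING shape
      have hxmem : p.2 ∈ pvKS t := by
        refine pv_mem_pvKS.mpr ?_
        simpa [PySem.Set.contains] using hc
      have hKSnew : pvKS (t ++ [p]) = pvKS t := by
        rw [pvKS, hofl, PySem.Set.add, hc, if_pos rfl, ← pvKS]
      rcases List.append_of_mem hxmem with ⟨k1, k2', he⟩
      rw [he] at hpw
      rcases List.pairwise_append.mp hpw with ⟨hpw1, hpw2, hcross⟩
      have h1 : ∀ k ∈ k1, pvLt k p.2 := fun k hk => hcross k hk p.2 (by simp)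
      have h2 : ∀ k ∈ k2', pvLt p.2 k := (List.pairwise_cons.mp hpw2).1
      have hg1 : ∀ k ∈ k1, pvGrp (t ++ [p]) k = pvGrp t k := by
        intro k hk
        rw [pv_grp_append]
        have hb : (p.2 == k) = false := by
          simp only [beq_eq_false_iff_ne, ne_eq]
          exact fun he2 => absurd (he2 ▸ h1 k hk) (lt_irrefl _)
        rw [hb]; simp
      have hg2 : ∀ k ∈ k2', pvGrp (t ++ [p]) k = pvGrp t k := by
        intro k hk
        rw [pv_grp_append]
        have hb : (p.2 == k) = false := by
          simp only [beq_eq_false_iff_ne, ne_eq]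
          exact fun he2 => absurd (he2 ▸ h2 k hk) (lt_irrefl _)
        rw [hb]; simp
      have hgx : pvGrp (t ++ [p]) p.2 = pvGrp t p.2 ++ [p] := by
        rw [pv_grp_append]
        simp
      rw [hL, ih, hKSnew, he]
      rw [List.flatMap_append, List.flatMap_append, List.flatMap_cons, List.flatMap_cons]
      rw [List.flatMap_congr hg1, List.flatMap_congr hg2, hgx]
      rw [← List.append_assoc]
      rw [pv_insertBy_split _ p (k1.flatMap (pvGrp t) ++ pvGrp t p.2)
        (k2'.flatMap (pvGrp t)) ?_ ?_]
      · simp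
      · intro y hy
        rcases List.mem_append.mp hy with hy1 | hy2
        · rcases List.mem_flatMap.mp hy1 with ⟨k, hk, hyk⟩
          have h2y : y.2 = k := pv_snd_of_mem_grp hyk
          refine pv_befK_false ?_
          rw [h2y]
          exact not_lt.mpr (le_of_lt (h1 k hk))
        · have h2y : y.2 = p.2 := pv_snd_of_mem_grp hy2
          refine pv_befK_false ?_
          rw [h2y]
          exact lt_irrefl _
      · intro h tl hbt
        have hh : h ∈ k2'.flatMap (pvGrp t) := by rw [hbt]; simp
        rcases List.mem_flatMap.mp hh with ⟨k, hk, hyk⟩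
        have h2y : h.2 = k := pv_snd_of_mem_grp hyk
        refine pv_befK_true ?_
        rw [h2y]
        exact h2 k hk

theorem pv_sorted_grouped (l : List (Int × List Int)) :
    PySem.List.sorted l (fun p => p.2) false = (pvKS l).flatMap (pvGrp l) := by
  rw [pv_sorted_inst, pv_sorted_groupedL]

theorem pv_contains_keys (d : PySem.Dict (List Int) (List Int)) (k : List Int) :
    d.contains k = PySem.Set.contains d.keys k := by
  rw [Bool.eq_iff_iff]
  simp [PySem.Dict.contains, PySem.Dict.keys, PySem.Set.contains, List.any_eq_true,
    List.mem_map]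

theorem pv_keys_insert (d : PySem.Dict (List Int) (List Int)) (k : List Int) (v : List Int) :
    (d.insert k v).keys = PySem.Set.add d.keys k := by
  have hc : PySem.Set.contains d.keys k = d.contains k := (pv_contains_keys d k).symm
  unfold PySem.Dict.insert PySem.Set.add
  rw [hc]
  rcases h : d.contains k with _ | _ <;> simp only [Bool.false_eq_true, if_false, if_true]
  · simp [PySem.Dict.keys]
  · simp only [PySem.Dict.keys, List.map_map]
    refine List.map_congr_left ?_
    intro p hp
    by_cases hpk : (p.1 == k) = true
    · simp only [Function.comp, hpk, if_true]
      exact (eq_of_beq hpk).symm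
    · simp [Function.comp, hpk]

theorem pv_gd_keys (l : List (Int × List Int)) :
    (l.foldl (fun d p => d.modify p.2 [] (fun w => w ++ [p.1])) PySem.Dict.empty).keys
      = PySem.Set.ofList (l.map (fun p => p.2)) := by
  induction l using List.reverseRecOn with
  | nil => rfl
  | append_singleton t p ih =>
    rw [List.foldl_append, List.map_append]
    simp only [List.foldl_cons, List.foldl_nil]
    rw [PySem.Dict.modify, pv_keys_insert, ih]
    conv_rhs => rw [PySem.Set.ofList, List.foldl_append]
    rfl

theorem pv_gd_getD (l : List (Int × List Int)) (k : List Int) :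
    (l.foldl (fun d p => d.modify p.2 [] (fun w => w ++ [p.1])) PySem.Dict.empty).getD k []
      = (pvGrp l k).map (fun q => q.1) := by
  induction l using List.reverseRecOn with
  | nil => rfl
  | append_singleton t p ih =>
    rw [List.foldl_append]
    simp only [List.foldl_cons, List.foldl_nil]
    by_cases hk : k = p.2
    · subst hk
      rw [PySem.Dict.getD_modify_self, ih]
      simp [pvGrp, List.filter_append]
    · rw [PySem.Dict.getD_modify_of_ne _ _ _ hk, ih]
      have : pvGrp (t ++ [p]) k = pvGrp t k := by
        simp [pvGrp, List.filter_append, List.filter_cons]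
        intro h
        exact absurd (by simpa using h) (Ne.symm hk)
      rw [this]

theorem pv_foldl_add_of_mem (xs : List (List Int)) (acc : List (List Int))
    (h : ∀ y ∈ xs, y ∈ acc) : xs.foldl PySem.Set.add acc = acc := by
  induction xs generalizing acc with
  | nil => rfl
  | cons x xs ih =>
    have hx : PySem.Set.add acc x = acc := by
      have hc : PySem.Set.contains acc x = true := by
        simp [PySem.Set.contains]
        exact h x (by simp)
      rw [PySem.Set.add, if_pos hc]
    rw [List.foldl_cons, hx]
    exact ih acc (fun y hy => h y (by simp [hy]))

theorem pv_foldl_add_block (xs : List (List Int)) (x : List Int) (acc : List (List Int))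
    (hne : xs ≠ []) (hall : ∀ y ∈ xs, y = x) (hx : x ∉ acc) :
    xs.foldl PySem.Set.add acc = acc ++ [x] := by
  cases xs with
  | nil => exact absurd rfl hne
  | cons y ys =>
    have hy : y = x := hall y (by simp)
    subst hy
    have h1 : PySem.Set.add acc y = acc ++ [y] := by
      have hc : PySem.Set.contains acc y = false := by
        simp [PySem.Set.contains]
        exact hx
      rw [PySem.Set.add, hc]
      simp
    rw [List.foldl_cons, h1]
    exact pv_foldl_add_of_mem ys (acc ++ [y])
      (fun z hz => by rw [hall z (by simp [hz])]; simp)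

theorem pv_ofList_blocks (ks : List (List Int)) (f : List Int → List (List Int))
    (hnd : ks.Nodup) (hf : ∀ k ∈ ks, ∀ y ∈ f k, y = k) (hne : ∀ k ∈ ks, f k ≠ [])
    (acc : List (List Int)) (hacc : ∀ k ∈ ks, k ∉ acc) :
    (ks.flatMap f).foldl PySem.Set.add acc = acc ++ ks := by
  induction ks generalizing acc with
  | nil => simp
  | cons k ks ih =>
    rw [List.flatMap_cons, List.foldl_append]
    rw [pv_foldl_add_block (f k) k acc (hne k (by simp)) (hf k (by simp)) (hacc k (by simp))]
    rw [ih (List.nodup_cons.mp hnd).2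
      (fun j hj => hf j (by simp [hj])) (fun j hj => hne j (by simp [hj]))
      (acc ++ [k]) ?_]
    · simp
    · intro j hj
      simp only [List.mem_append, List.mem_singleton]
      rintro (h1 | rfl)
      · exact hacc j (by simp [hj]) h1
      · exact (List.nodup_cons.mp hnd).1 hj

def pvOffs (g : List Int → List (Int × List Int)) : List (List Int) → Int → List (List Int × Int × Int)
  | [], _ => []
  | k :: ks, s => (k, s, ((g k).length : Int)) :: pvOffs g ks (s + (g k).length)

theorem pv_snd_mem_of_mem_enumerate {X : List (List Int)} {s : Int} {q : Int × List Int}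
    (h : q ∈ PySem.List.enumerate X s) : q.2 ∈ X := by
  rcases (PySem.List.mem_enumerate_iff _ _ _).mp h with ⟨i, hi, rfl⟩
  exact List.getElem_mem hi

theorem pv_positions (f : List Int → List (Int × List Int)) (ks : List (List Int))
    (hnd : ks.Nodup) (hf : ∀ k ∈ ks, ∀ q ∈ f k, q.2 = k) (s : Int) :
    ks.map (fun k => (k,
        (pvGrp (PySem.List.enumerate (ks.flatMap (fun j => (f j).map (fun q => q.2))) s) k).map
          (fun q => q.1)))
      = (pvOffs f ks s).map (fun t => (t.1, PySem.List.pyRange t.2.1 (t.2.1 + t.2.2) 1)) := by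
  simp only [pvGrp]
  induction ks generalizing s with
  | nil => rfl
  | cons k ks ih =>
    have hndk := (List.nodup_cons.mp hnd).1
    have hnd' := (List.nodup_cons.mp hnd).2
    have hmemL : ∀ y ∈ (f k).map (fun q => q.2), y = k := by
      intro y hy
      rcases List.mem_map.mp hy with ⟨q, hq, rfl⟩
      exact hf k (by simp) q hq
    have hrest : ∀ q ∈ PySem.List.enumerate
        (ks.flatMap (fun j => (f j).map (fun q => q.2))) (s + ((f k).map (fun q => q.2)).length),
        q.2 ∈ ks := by
      intro q hq
      have h2 := pv_snd_mem_of_mem_enumerate hq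
      rcases List.mem_flatMap.mp h2 with ⟨j, hj, hqj⟩
      rcases List.mem_map.mp hqj with ⟨r, hr, hr2⟩
      rw [← hr2, hf j (by simp [hj]) r hr]
      exact hj
    rw [List.flatMap_cons, PySem.List.enumerate_append, List.map_cons]
    -- head component
    have hhead : ((PySem.List.enumerate ((f k).map (fun q => q.2)) s ++
          PySem.List.enumerate (ks.flatMap (fun j => (f j).map (fun q => q.2)))
            (s + ((f k).map (fun q => q.2)).length)).filter (fun q => q.2 == k)).map (fun q => q.1)
        = PySem.List.pyRange s (s + ((f k).length : Int)) 1 := by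
      rw [List.filter_append]
      have h1 : (PySem.List.enumerate ((f k).map (fun q => q.2)) s).filter (fun q => q.2 == k)
          = PySem.List.enumerate ((f k).map (fun q => q.2)) s := by
        refine List.filter_eq_self.mpr ?_
        intro q hq
        simpa using hmemL q.2 (pv_snd_mem_of_mem_enumerate hq)
      have h2 : (PySem.List.enumerate (ks.flatMap (fun j => (f j).map (fun q => q.2)))
            (s + ((f k).map (fun q => q.2)).length)).filter (fun q => q.2 == k) = [] := by
        refine List.filter_eq_nil_iff.mpr ?_
        intro q hq
        have := hrest q hq
        simp only [beq_iff_eq]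
        exact fun he => hndk (he ▸ this)
      rw [h1, h2, List.append_nil, PySem.List.map_fst_enumerate]
      simp
    rw [hhead]
    -- tail components
    have htail : ∀ k' ∈ ks,
        ((PySem.List.enumerate ((f k).map (fun q => q.2)) s ++
          PySem.List.enumerate (ks.flatMap (fun j => (f j).map (fun q => q.2)))
            (s + ((f k).map (fun q => q.2)).length)).filter (fun q => q.2 == k')).map (fun q => q.1)
        = ((PySem.List.enumerate (ks.flatMap (fun j => (f j).map (fun q => q.2)))
            (s + ((f k).map (fun q => q.2)).length)).filter (fun q => q.2 == k')).map (fun q => q.1) := by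
      intro k' hk'
      rw [List.filter_append]
      have h1 : (PySem.List.enumerate ((f k).map (fun q => q.2)) s).filter (fun q => q.2 == k') = [] := by
        refine List.filter_eq_nil_iff.mpr ?_
        intro q hq
        have := hmemL q.2 (pv_snd_mem_of_mem_enumerate hq)
        simp only [beq_iff_eq]
        exact fun he => hndk ((this ▸ he) ▸ hk')
      rw [h1, List.nil_append]
    rw [List.map_congr_left (fun k' hk' => by rw [htail k' hk'])]
    show _ = (pvOffs f (k :: ks) s).map _
    rw [pvOffs, List.map_cons]
    congr 1
    have := ih hnd' (fun j hj => hf j (by simp [hj])) (s + ((f k).length : Int))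
    rw [List.length_map] at *
    convert this using 3

def pvWrites : List Int → List Int → Int → List Int
  | [], rv, _ => rv
  | o :: os, rv, p => pvWrites os (PySem.List.pySetD rv o p) (p + 1)

theorem pv_enum_fold_writes (L : List (Int × List Int)) (rv : List Int) (s : Int) :
    (PySem.List.enumerate L s).foldl (fun acc q => PySem.List.pySetD acc q.2.1 q.1) rv
      = pvWrites (L.map (fun q => q.1)) rv s := by
  induction L generalizing rv s with
  | nil => rfl
  | cons q L ih =>
    simp only [PySem.List.enumerate_cons, List.foldl_cons, List.map_cons, pvWrites, ih]

theorem pv_writes_append (xs ys : List Int) (rv : List Int) (p : Int) :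
    pvWrites (xs ++ ys) rv p = pvWrites ys (pvWrites xs rv p) (p + xs.length) := by
  induction xs generalizing rv p with
  | nil => simp [pvWrites]
  | cons o os ih =>
    simp only [List.cons_append, pvWrites, ih, List.length_cons]
    congr 1
    push_cast
    ring

theorem pv_inner_fold (orig ci rv : List Int) (p : Int) :
    orig.foldl (fun st2 oi => (st2.1 ++ [oi], PySem.List.pySetD st2.2.1 oi st2.2.2, st2.2.2 + 1))
        (ci, rv, p)
      = (ci ++ orig, pvWrites orig rv p, p + (orig.length : Int)) := by
  induction orig generalizing ci rv p with
  | nil => simp [pvWrites]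
  | cons o os ih =>
    simp only [List.foldl_cons, pvWrites, ih, List.length_cons]
    refine Prod.ext (by simp) (Prod.ext rfl ?_)
    simp
    ring

theorem pv_insert_fresh {d : PySem.Dict (List Int) (List Int)} {k : List Int}
    (h : d.contains k = false) (v : List Int) :
    d.insert k v = PySem.Dict.mk (d.items ++ [(k, v)]) := by
  simp [PySem.Dict.insert, h]

theorem pv_contains_append_fresh (d : PySem.Dict (List Int) (List Int)) (k k' : List Int)
    (v : List Int) (h : d.contains k' = false) (hne : k' ≠ k) :
    (PySem.Dict.mk (d.items ++ [(k, v)])).contains k' = false := by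
  simp [PySem.Dict.contains] at h ⊢
  refine ⟨h, ?_⟩
  simpa using (Ne.symm hne)

theorem pv_bfold (g : List Int → List (Int × List Int)) (G : PySem.Dict (List Int) (List Int))
    (ks : List (List Int)) (hG : ∀ k ∈ ks, G.getD k [] = (g k).map (fun q => q.1))
    (hnd : ks.Nodup)
    (d0 : PySem.Dict (List Int) (List Int)) (hd0 : ∀ k ∈ ks, d0.contains k = false)
    (ci0 rv0 : List Int) (s : Int) :
    ks.foldl (fun st shape =>
        let orig := G.getD shape []
        let sg := st.1.insert shape (PySem.List.pyRange st.2.2.2 (st.2.2.2 + (orig.length : Int)) 1)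
        let inner := orig.foldl
          (fun st2 original_index =>
            (st2.1 ++ [original_index], PySem.List.pySetD st2.2.1 original_index st2.2.2, st2.2.2 + 1))
          (st.2.1, st.2.2.1, st.2.2.2)
        (sg, inner.1, inner.2.1, inner.2.2)) (d0, ci0, rv0, s)
      = (PySem.Dict.mk (d0.items ++ (pvOffs g ks s).map
            (fun t => (t.1, PySem.List.pyRange t.2.1 (t.2.1 + t.2.2) 1))),
         ci0 ++ ks.flatMap (fun k => (g k).map (fun q => q.1)),
         pvWrites (ks.flatMap (fun k => (g k).map (fun q => q.1))) rv0 s,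
         s + ((ks.flatMap (fun k => (g k).map (fun q => q.1))).length : Int)) := by
  induction ks generalizing d0 ci0 rv0 s with
  | nil =>
    simp only [List.foldl_nil, pvOffs, List.map_nil, List.append_nil, List.flatMap_nil,
      List.length_nil, Nat.cast_zero, add_zero]
    exact Prod.ext (by cases d0; rfl) rfl
  | cons k ks ih =>
    rw [List.foldl_cons]
    simp only
    rw [hG k (by simp), pv_inner_fold]
    rw [pv_insert_fresh (hd0 k (by simp))]
    rw [List.length_map]
    rw [ih (fun j hj => hG j (by simp [hj])) (List.nodup_cons.mp hnd).2
      (PySem.Dict.mk (d0.items ++ [(k, PySem.List.pyRange s (s + ((g k).length : Int)) 1)]))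
      (fun j hj => pv_contains_append_fresh d0 k j _ (hd0 j (by simp [hj]))
        (fun he => (List.nodup_cons.mp hnd).1 (he ▸ hj)))]
    rw [List.flatMap_cons, pv_writes_append, List.length_map]
    refine Prod.ext ?_ (Prod.ext ?_ (Prod.ext rfl ?_))
    · show PySem.Dict.mk _ = PySem.Dict.mk _
      rw [pvOffs, List.map_cons]
      simp
    · simp
    · simp only [List.length_append, List.length_map]
      push_cast
      ring

theorem pv_grp_ne_nil {l : List (Int × List Int)} {k : List Int} (h : k ∈ pvKS l) :
    pvGrp l k ≠ [] := by
  rcases List.mem_map.mp (pv_mem_pvKS.mp h) with ⟨q, hq, rfl⟩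
  intro hnil
  have : q ∈ pvGrp l q.2 := List.mem_filter.mpr ⟨hq, by simp⟩
  rw [hnil] at this
  exact absurd this (List.not_mem_nil)

theorem pv_ks_nodup (l : List (Int × List Int)) : (pvKS l).Nodup := by
  have hpw : (pvKS l).Pairwise pvLt :=
    PySem.List.sorted_ofList_pairwise_lt (l.map (fun p => p.2))
  exact hpw.imp (fun h => ne_of_lt h)

-- ===== VERDICT =====
theorem sort_and_group_matrices_py_spec : Claim_equal_sort_and_group_matrices_py := by
  intro ms _hdom
  unfold Spec_sort_and_group_matrices_py
  simp only [sort_and_group_matrices_py, sort_and_group_matrices_py_alt]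
  rw [pv_sorted_grouped (PySem.List.enumerate ms)]
  rw [pv_gd_keys (PySem.List.enumerate ms)]
  rw [pv_uniqB (PySem.List.enumerate ms)]
  rw [pv_bfold (pvGrp (PySem.List.enumerate ms))
      (List.foldl (fun d p => d.modify p.2 [] fun l => l ++ [p.1]) PySem.Dict.empty
        (PySem.List.enumerate ms))
      (pvKS (PySem.List.enumerate ms))
      (fun k _hk => pv_gd_getD (PySem.List.enumerate ms) k)
      (pv_ks_nodup _)
      PySem.Dict.empty (fun k _hk => rfl)
      [] (PySem.List.pyRepeat [0] (ms.length : Int)) 0]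
  rw [List.map_flatMap, List.map_flatMap, pv_enum_fold_writes, List.map_flatMap]
  have hA1 : PySem.Set.ofList ((pvKS (PySem.List.enumerate ms)).flatMap
      (fun a => (pvGrp (PySem.List.enumerate ms) a).map (fun p => p.2)))
      = pvKS (PySem.List.enumerate ms) := by
    have hb := pv_ofList_blocks (pvKS (PySem.List.enumerate ms))
      (fun a => (pvGrp (PySem.List.enumerate ms) a).map (fun p => p.2))
      (pv_ks_nodup _)
      (fun k _hk y hy => by
        rcases List.mem_map.mp hy with ⟨q, hq, rfl⟩
        exact pv_snd_of_mem_grp hq)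
      (fun k hk => by simpa using pv_grp_ne_nil hk)
      [] (by simp)
    simpa [PySem.Set.ofList, PySem.Set.empty] using hb
  have hkeysA : (List.foldl (fun d p => d.modify p.2 [] fun l => l ++ [p.1]) PySem.Dict.empty
      (PySem.List.enumerate ((pvKS (PySem.List.enumerate ms)).flatMap
        (fun a => (pvGrp (PySem.List.enumerate ms) a).map (fun p => p.2))))).keys
      = pvKS (PySem.List.enumerate ms) := by
    rw [pv_gd_keys, PySem.List.map_snd_enumerate]
    exact hA1
  have hitems : (List.foldl (fun d p => d.modify p.2 [] fun l => l ++ [p.1]) PySem.Dict.empty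
      (PySem.List.enumerate ((pvKS (PySem.List.enumerate ms)).flatMap
        (fun a => (pvGrp (PySem.List.enumerate ms) a).map (fun p => p.2))))).items
      = (pvOffs (pvGrp (PySem.List.enumerate ms)) (pvKS (PySem.List.enumerate ms)) 0).map
          (fun t => (t.1, PySem.List.pyRange t.2.1 (t.2.1 + t.2.2) 1)) := by
    rw [PySem.Dict.items_eq_map_keys _ (by rw [hkeysA]; exact pv_ks_nodup _) [], hkeysA]
    simp only [pv_gd_getD]
    exact pv_positions (pvGrp (PySem.List.enumerate ms)) (pvKS (PySem.List.enumerate ms))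
      (pv_ks_nodup _) (fun k _hk q hq => pv_snd_of_mem_grp hq) 0
  refine Prod.ext ?_ (Prod.ext ?_ (Prod.ext ?_ ?_))
  · exact hkeysA
  · simpa using hitems
  · simp
  · simp
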